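-- pv_equiv track=rewrite | github.com/onlinegamedev2026-afk/luck-game | development/pure_dev/tin_patti_result_checker/check_results.py | hand_rank
-- ===== SOURCE A (Python) =====
-- RANK_ORDER = {'2':2, '3':3, '4':4, '5':5, '6':6, '7':7,
--               '8':8, '9':9, 'T':10, 'J':11, 'Q':12, 'K':13, 'A':14}
--
-- def is_sequence(values):
--     values = sorted(values)
--
--     # Normal sequence
--     if values[2] - values[1] == 1 and values[1] - values[0] == 1:
--         return True
--
--     # A-2-3 special case
--     if values == [2, 3, 14]:
--         return True
--
--     return False
--
-- def hand_rank(hand):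
--     values = sorted([RANK_ORDER[r] for r, s in hand])
--     suits = [s for r, s in hand]
--
--     is_flush = len(set(suits)) == 1
--     seq = is_sequence(values)
--
--     # Count occurrences
--     counts = {}
--     for v in values:
--         counts[v] = counts.get(v, 0) + 1
--     count_values = sorted(counts.values(), reverse=True)
--
--     # Trail (3 same)
--     if count_values == [3]:
--         return (6, values[::-1])
--
--     # Pure sequence
--     if seq and is_flush:
--         if values == [2, 3, 14]:
--             return (5, [3])  # lowest
--         return (5, [values[2]])  # highest card
--
--     # Sequence
--     if seq:
--         if values == [2, 3, 14]:
--             return (4, [3])  # lowest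
--         return (4, [values[2]])
--
--     # Color
--     if is_flush:
--         return (3, values[::-1])
--
--     # Pair
--     if count_values == [2,1]:
--         pair = max(counts, key=lambda x: (counts[x], x))
--         kicker = min(counts, key=lambda x: (counts[x], x))
--         return (2, [pair, kicker])
--
--     # High card
--     return (1, values[::-1])
-- ===== SOURCE B (Python) =====
-- RANK_ORDER = {'2':2, '3':3, '4':4, '5':5, '6':6, '7':7,
--               '8':8, '9':9, 'T':10, 'J':11, 'Q':12, 'K':13, 'A':14}
--
-- def hand_rank(hand):
--     v = sorted(RANK_ORDER[r] for r, s in hand)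
--     a, b, c = v
--     flush = hand[0][1] == hand[1][1] == hand[2][1]
--     if a == b == c:
--         return (6, [c, b, a])
--     if (b - a == 1 and c - b == 1) or v == [2, 3, 14]:
--         top = 3 if v == [2, 3, 14] else c
--         return ((5, [top]) if flush else (4, [top]))
--     if flush:
--         return (3, [c, b, a])
--     if a == b:
--         return (2, [a, c])
--     if b == c:
--         return (2, [b, a])
--     return (1, [c, b, a])
-- ===== Notes on version B (the rewrite author's own statement) =====
-- stated objective: simpler
-- what changed: Replaces the frequency dict, the sorted counts list and the max/min-with-key extraction by direct positional equality tests on the sorted 3-element values (trail: all equal; pair: adjacent equal, with pair/kicker read off the sorted positions), and tests flush by comparing the three suits directly instead of building a set.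
-- outside the precondition, e.g. on hand_rank([('2', 'h'), ('3', 'h'), ('4', 'h'), ('5', 'h')]): A returns (5, [4]), B raises ValueError
import Mathlib
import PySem

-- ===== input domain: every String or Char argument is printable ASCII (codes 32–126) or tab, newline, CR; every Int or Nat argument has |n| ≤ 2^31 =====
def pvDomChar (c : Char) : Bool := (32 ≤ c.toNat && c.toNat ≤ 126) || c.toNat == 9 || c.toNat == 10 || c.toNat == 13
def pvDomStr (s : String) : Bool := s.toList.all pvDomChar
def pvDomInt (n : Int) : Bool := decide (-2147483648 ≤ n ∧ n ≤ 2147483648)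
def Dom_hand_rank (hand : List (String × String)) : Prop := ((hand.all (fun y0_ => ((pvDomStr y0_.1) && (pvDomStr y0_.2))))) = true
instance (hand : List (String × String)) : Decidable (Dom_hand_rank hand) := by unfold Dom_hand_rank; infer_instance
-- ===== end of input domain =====

-- B replaces A's frequency dict + sorted-counts + keyed max/min extraction by positional
-- equality tests on the sorted 3-value triple (objective: simpler).


-- ===== PORT A =====
def RANK_ORDER : PySem.Dict String Int :=
  PySem.Dict.ofList [("2",2),("3",3),("4",4),("5",5),("6",6),("7",7),("8",8),("9",9),
                     ("T",10),("J",11),("Q",12),("K",13),("A",14)]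

def is_sequence (values : List Int) : Bool :=
  let values := PySem.List.sorted values (fun x => x) false
  -- values[2]/values[1]/values[0] raise IndexError on short lists; Pre_ keeps length = 3
  if PySem.List.pyGetD values 2 0 - PySem.List.pyGetD values 1 0 == 1 &&
     PySem.List.pyGetD values 1 0 - PySem.List.pyGetD values 0 0 == 1 then true
  else if values == [2, 3, 14] then true
  else false

def hand_rank (hand : List (String × String)) : Int × List Int :=
  -- RANK_ORDER[r] raises KeyError for unknown ranks; Pre_ keeps ranks inside the dict
  let values := PySem.List.sorted (hand.map (fun p => RANK_ORDER.getD p.1 0)) (fun x => x) false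
  let suits := hand.map (fun p => p.2)
  let is_flush := PySem.Set.len (PySem.Set.ofList suits) == 1
  let seq := is_sequence values
  let counts := values.foldl (fun d v => d.insert v (d.getD v 0 + 1)) PySem.Dict.empty
  let count_values := PySem.List.sorted counts.values (fun x => x) true
  if count_values == [3] then
    (6, (PySem.List.slice? values none none (-1)).getD [])   -- values[::-1]; step ≠ 0, never raises
  else if is_sequence values && is_flush then
    if values == [2, 3, 14] then (5, [3]) else (5, [PySem.List.pyGetD values 2 0])
  else if seq then
    if values == [2, 3, 14] then (4, [3]) else (4, [PySem.List.pyGetD values 2 0])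
  else if is_flush then
    (3, (PySem.List.slice? values none none (-1)).getD [])
  else if count_values == [2, 1] then
    let pair := (PySem.List.max2? counts.keys (fun x => counts.getD x 0) (fun x => x)).getD 0
    let kicker := (PySem.List.min2? counts.keys (fun x => counts.getD x 0) (fun x => x)).getD 0
    (2, [pair, kicker])
  else
    (1, (PySem.List.slice? values none none (-1)).getD [])

-- ===== PORT B =====
def hand_rank_alt (hand : List (String × String)) : Int × List Int :=
  let v := PySem.List.sorted (hand.map (fun p => RANK_ORDER.getD p.1 0)) (fun x => x) false
  match v with
  | [a, b, c] =>
    -- flush = hand[0][1] == hand[1][1] == hand[2][1]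
    let flush := (PySem.List.pyGetD hand 0 ("", "")).2 == (PySem.List.pyGetD hand 1 ("", "")).2 &&
                 (PySem.List.pyGetD hand 1 ("", "")).2 == (PySem.List.pyGetD hand 2 ("", "")).2
    if a == b && b == c then (6, [c, b, a])
    else if (b - a == 1 && c - b == 1) || ([a, b, c] : List Int) == [2, 3, 14] then
      let top := if ([a, b, c] : List Int) == [2, 3, 14] then (3 : Int) else c
      if flush then (5, [top]) else (4, [top])
    else if flush then (3, [c, b, a])
    else if a == b then (2, [a, c])
    else if b == c then (2, [b, a])
    else (1, [c, b, a])
  | _ => (0, [])   -- 'a, b, c = v' raises ValueError unless len(v) = 3; Pre_ excludes that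

-- ===== PRECONDITION & SPEC =====
-- Pre_ excludes hands that are not exactly 3 cards with ranks among the 13 rank symbols:
-- on fewer cards or an unknown rank A raises (IndexError/KeyError); on more than 3 cards
-- A still returns a value read off only parts of the sorted list while B's 3-way unpacking
-- raises ValueError.
def Pre_hand_rank (hand : List (String × String)) : Prop :=
  hand.length = 3 ∧
  ∀ p ∈ hand, p.1 ∈ (["2","3","4","5","6","7","8","9","T","J","Q","K","A"] : List String)
instance (hand : List (String × String)) : Decidable (Pre_hand_rank hand) := by
  unfold Pre_hand_rank; infer_instance
def pvWitness_hand_rank : (List (String × String)) := [("2","h"),("5","h"),("9","d")]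

def Spec_hand_rank (hand : List (String × String)) (out : Int × List Int) : Prop := out = hand_rank_alt hand
instance (hand : List (String × String)) (out : Int × List Int) : Decidable (Spec_hand_rank hand out) := by unfold Spec_hand_rank; infer_instance

-- ===== CLAIM (what is proved, stated in full; the proofs are below) =====
def Claim_equal_hand_rank : Prop := ∀ (hand : List (String × String)), Dom_hand_rank hand → Pre_hand_rank hand → Spec_hand_rank hand (hand_rank hand)

-- ===== LEMMAS AND PROOFS =====

-- sorted of a 3-element Int list is a nondecreasing triple
lemma sorted3 (l : List Int) (h : l.length = 3) :
    ∃ a b c : Int, PySem.List.sorted l (fun x => x) false = [a, b, c] ∧ a ≤ b ∧ b ≤ c := by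
  have hlen : (PySem.List.sorted l (fun x => x) false).length = 3 := by
    rw [PySem.List.length_sorted, h]
  have hpw := PySem.List.sorted_pairwise (xs := l) (key := fun x => x)
  rcases hs : PySem.List.sorted l (fun x => x) false with _ | ⟨a, _ | ⟨b, _ | ⟨c, rest⟩⟩⟩ <;>
    rw [hs] at hlen <;> simp at hlen
  rw [hs] at hpw
  simp only [List.pairwise_cons, List.mem_cons] at hpw
  refine ⟨a, b, c, ?_, hpw.1 b (by simp), hpw.2.1 c (by simp)⟩
  rw [hlen]

-- an already nondecreasing triple is its own sorted order
lemma sorted_triple_self (a b c : Int) (hab : a ≤ b) (hbc : b ≤ c) :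
    PySem.List.sorted [a, b, c] (fun x : Int => x) false = [a, b, c] := by
  apply PySem.List.sorted_eq_self_of_pairwise
  simp only [List.pairwise_cons, List.mem_cons, List.not_mem_nil]
  refine ⟨fun y hy => ?_, fun y hy => ?_, by simp⟩
  · rcases hy with h|h|h <;> first | (subst h; omega) | simp_all
  · rcases hy with h|h <;> first | (subst h; omega) | simp_all

-- Python's len(set([s1,s2,s3])) == 1 is the double suit equality
lemma flush_eq (s1 s2 s3 : String) :
    (PySem.Set.len (PySem.Set.ofList [s1, s2, s3]) == 1) = (s1 == s2 && s2 == s3) := by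
  by_cases h12 : s1 = s2 <;> by_cases h23 : s2 = s3 <;> by_cases h13 : s1 = s3 <;>
    subst_eqs <;>
    simp_all [PySem.Set.ofList, PySem.Set.add, PySem.Set.contains, PySem.Set.len, PySem.Set.empty,
      List.foldl, Ne.symm]

-- ===== VERDICT (by name: the statement is the Claim_ definition above) =====
theorem hand_rank_spec : Claim_equal_hand_rank := by
  intro hand _ hpre
  obtain ⟨hlen, _⟩ := hpre
  rcases hand with _ | ⟨⟨r1, s1⟩, _ | ⟨⟨r2, s2⟩, _ | ⟨⟨r3, s3⟩, rest⟩⟩⟩ <;> simp at hlen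
  subst hlen
  obtain ⟨a, b, c, hs, hab, hbc⟩ :=
    sorted3 ([(r1, s1), (r2, s2), (r3, s3)].map (fun p => RANK_ORDER.getD p.1 0)) (by simp)
  simp only [List.map_cons, List.map_nil] at hs
  unfold Spec_hand_rank hand_rank hand_rank_alt is_sequence
  simp only [List.map_cons, List.map_nil, hs, sorted_triple_self a b c hab hbc, flush_eq,
    PySem.List.slice?_none_none_neg_one]
  by_cases hAB : a = b <;> by_cases hBC : b = c
  · subst hAB; subst hBC
    simp [List.foldl, PySem.Dict.insert, PySem.Dict.empty, PySem.Dict.getD, PySem.Dict.get?,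
      PySem.Dict.contains, PySem.Dict.values, PySem.List.sorted, PySem.List.insertBy]
  · subst hAB
    have hac : a ≠ c := hBC
    have hx : (([a, a, c] : List Int) == [2, 3, 14]) = false := by simp; omega
    simp [hx, hac, List.foldl, PySem.Dict.insert, PySem.Dict.empty, PySem.Dict.getD, PySem.Dict.get?,
      PySem.Dict.contains, PySem.Dict.values, PySem.Dict.keys, PySem.List.sorted,
      PySem.List.insertBy, PySem.List.pyGetD,
      PySem.List.max2?, PySem.List.min2?]
  · subst hBC
    have hac : a ≠ b := hAB
    have hx : (([a, b, b] : List Int) == [2, 3, 14]) = false := by simp; omega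
    simp [hx, hac, List.foldl, PySem.Dict.insert, PySem.Dict.empty, PySem.Dict.getD, PySem.Dict.get?,
      PySem.Dict.contains, PySem.Dict.values, PySem.Dict.keys, PySem.List.sorted,
      PySem.List.insertBy, PySem.List.pyGetD,
      PySem.List.max2?, PySem.List.min2?]
  · have hac : a ≠ c := by omega
    simp [hAB, hBC, hac, List.foldl, PySem.Dict.insert, PySem.Dict.empty, PySem.Dict.getD,
      PySem.Dict.get?, PySem.Dict.contains, PySem.Dict.values,
      PySem.List.sorted, PySem.List.insertBy, PySem.List.pyGetD]
    have hcomm : (c - b = 1 ∧ b - a = 1) ↔ (b - a = 1 ∧ c - b = 1) := and_comm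
    by_cases h1 : b - a = 1 ∧ c - b = 1 <;> by_cases h2 : a = 2 ∧ b = 3 ∧ c = 14 <;>
      simp [hcomm, h1, h2]
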